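-- pv_equiv track=rewrite | github.com/s94178jeff/CXR_Fairness_in_SSL | ssl_inference.py | gen_flip_path_list
-- ===== SOURCE A (Python) =====
-- def gen_flip_path_list(path_list,flip_size=3):
--     #path_list = path_list[-500:-200]
--     flip_path_list = list()
--     for _ in range(flip_size):
--         flip_path_list.append(list())
--     for path in path_list:
--
--         shortcut_label = int(path.rsplit('.',1)[0][-1])
--         flip_str_head = path.replace('test','test_flip').replace('val','val_flip').rsplit('_',1)[0]+'_'
--         flip_str_tail = path.rsplit('.',1)[-1]#png,jpg
--         tmp = 0
--         for flip_label in range(flip_size+1):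
--             if flip_label != shortcut_label:
--                 flip_path = f"{flip_str_head}{flip_label}.{flip_str_tail}"
--                 flip_path_list[tmp].append(flip_path)
--                 tmp += 1
--
--     for i in range(flip_size):
--         assert len(path_list) == len(flip_path_list[i])
--         for j in range(len(flip_path_list[i])):
--             assert flip_path_list[i][j].rsplit('_',1)[0] == path_list[j].replace('test','test_flip').replace('val','val_flip').rsplit('_',1)[0]
--     return flip_path_list
-- ===== SOURCE B (Python) =====
-- def gen_flip_path_list(path_list, flip_size=3):
--     # Row-major: one row of flip paths per input path, then transpose by index.
--     rows = []
--     for path in path_list: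
--         shortcut_label = int(path.rsplit('.', 1)[0][-1])
--         head = path.replace('test', 'test_flip').replace('val', 'val_flip').rsplit('_', 1)[0] + '_'
--         tail = path.rsplit('.', 1)[-1]
--         rows.append([f"{head}{l}.{tail}" for l in range(flip_size + 1) if l != shortcut_label])
--     if not rows:
--         return [[] for _ in range(flip_size)]
--     return [[row[i] for row in rows] for i in range(flip_size)]
-- ===== Notes on version B (the rewrite author's own statement) =====
-- stated objective: alternative
-- what changed: B builds one row of flip paths per input path and then transposes by index into the flip_size parallel lists, instead of A's column-major scatter that appends into pre-allocated lists via a running column counter; A's trailing assertion pass (which always succeeds on Pre_) is dropped.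
import Mathlib
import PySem

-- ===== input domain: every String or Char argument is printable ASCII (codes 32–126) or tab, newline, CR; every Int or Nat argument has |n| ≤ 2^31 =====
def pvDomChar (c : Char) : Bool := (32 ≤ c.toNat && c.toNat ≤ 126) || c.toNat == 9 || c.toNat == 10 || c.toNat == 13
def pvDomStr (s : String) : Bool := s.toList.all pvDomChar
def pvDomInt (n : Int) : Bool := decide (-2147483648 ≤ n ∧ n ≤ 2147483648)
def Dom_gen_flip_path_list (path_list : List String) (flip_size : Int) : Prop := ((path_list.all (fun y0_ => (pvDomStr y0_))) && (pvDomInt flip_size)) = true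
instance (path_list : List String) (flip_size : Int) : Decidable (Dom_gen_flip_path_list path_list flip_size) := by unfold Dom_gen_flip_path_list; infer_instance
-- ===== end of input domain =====

-- B replaces A's column-major scatter (running column counter into pre-allocated lists) by a
-- row-per-path build followed by an index transpose; same cost, no speed claim.

-- shared transliterations of the per-path Python expressions (identical in Source A and Source B):
-- s.rsplit(sep, 1)[0] and s.rsplit(sep, 1)[-1], exact for a 1-character separator.
def rsplitStem (s : List Char) (c : Char) : List Char :=
  if c ∈ s then s.take (s.length - 1 - List.idxOf c s.reverse) else s

def rsplitTail (s : List Char) (c : Char) : List Char :=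
  if c ∈ s then s.drop (s.length - List.idxOf c s.reverse) else s

-- int(path.rsplit('.',1)[0][-1]); the 'none' fallbacks (empty stem = IndexError,
-- non-digit = ValueError in Python) are excluded by Pre_gen_flip_path_list.
def labelOf (p : String) : Int :=
  match (rsplitStem p.toList '.').getLast? with
  | some ch => (PySem.Int.ofChars? [ch]).getD 0
  | none => 0

-- path.replace('test','test_flip').replace('val','val_flip').rsplit('_',1)[0] + '_'
def headOf (p : String) : String :=
  let r := PySem.Str.replace (PySem.Str.replace p "test" "test_flip") "val" "val_flip"
  String.ofList (rsplitStem r.toList '_' ++ ['_'])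

-- path.rsplit('.',1)[-1]
def tailOf (p : String) : String := String.ofList (rsplitTail p.toList '.')

-- f"{flip_str_head}{flip_label}.{flip_str_tail}"
def mkPath (head : String) (l : Int) (tail : String) : String :=
  String.ofList (head.toList ++ PySem.Int.toChars l ++ '.' :: tail.toList)

-- ===== PORT A =====
def gen_flip_path_list (path_list : List String) (flip_size : Int) : List (List String) :=
  -- flip_path_list = [[] for _ in range(flip_size)] (via the append loop)
  let init : List (List String) := (PySem.List.pyRange 0 flip_size 1).map (fun _ => [])
  -- for path in path_list: …
  path_list.foldl (fun flip_path_list path =>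
    let shortcut_label := labelOf path
    let flip_str_head := headOf path
    let flip_str_tail := tailOf path
    -- tmp = 0; for flip_label in range(flip_size+1): …
    ((PySem.List.pyRange 0 (flip_size + 1) 1).foldl
      (fun (st : List (List String) × Nat) flip_label =>
        if flip_label ≠ shortcut_label then
          -- flip_path_list[tmp].append(flip_path); tmp += 1
          -- (List.modify is a no-op when tmp is out of range — Python's IndexError there is excluded by Pre_)
          (st.1.modify st.2 (fun c => c ++ [mkPath flip_str_head flip_label flip_str_tail]), st.2 + 1)
        else st)
      (flip_path_list, 0)).1) init
  -- the trailing assert loops return no value and always succeed under Pre_ (inputs whose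
  -- extension part contains '_' would fail them and are excluded by Pre_)

-- ===== PORT B =====
-- [f"{head}{l}.{tail}" for l in range(flip_size+1) if l != shortcut_label]
def rowOf (flip_size : Int) (path : String) : List String :=
  ((PySem.List.pyRange 0 (flip_size + 1) 1).filter (fun l => l ≠ labelOf path)).map
    (fun l => mkPath (headOf path) l (tailOf path))

def gen_flip_path_list_alt (path_list : List String) (flip_size : Int) : List (List String) :=
  let rows := path_list.map (rowOf flip_size)
  if rows.isEmpty then
    (PySem.List.pyRange 0 flip_size 1).map (fun _ => [])   -- [[] for _ in range(flip_size)]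
  else
    -- [[row[i] for row in rows] for i in range(flip_size)]; row[i] is in range under Pre_
    (PySem.List.pyRange 0 flip_size 1).map (fun i => rows.map (fun r => PySem.List.pyGetD r i ""))

-- ===== PRECONDITION & SPEC =====
-- Pre_ admits exactly the inputs on which the Python A returns: the character before each
-- path's extension must be a digit (else ValueError/IndexError), its value must be a usable
-- shortcut label for flip_size (else IndexError on the column list), and for flip_size ≥ 1 the
-- extension part must be '_'-free (else the final assert fails).
def Pre_gen_flip_path_list (path_list : List String) (flip_size : Int) : Prop :=
  (∀ p ∈ path_list, (((rsplitStem p.toList '.').getLast?.map PySem.Chars.isdigit).getD false) = true) ∧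
  (1 ≤ flip_size → ∀ p ∈ path_list,
    0 ≤ labelOf p ∧ labelOf p ≤ flip_size ∧ '_' ∉ rsplitTail p.toList '.') ∧
  (flip_size = 0 → ∀ p ∈ path_list, labelOf p = 0)
instance (path_list : List String) (flip_size : Int) : Decidable (Pre_gen_flip_path_list path_list flip_size) := by unfold Pre_gen_flip_path_list; infer_instance

def pvWitness_gen_flip_path_list : List String × Int := (["val_0.png", "test_3.jpg"], 3)

def Spec_gen_flip_path_list (path_list : List String) (flip_size : Int) (out : List (List String)) : Prop := out = gen_flip_path_list_alt path_list flip_size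
instance (path_list : List String) (flip_size : Int) (out : List (List String)) : Decidable (Spec_gen_flip_path_list path_list flip_size out) := by unfold Spec_gen_flip_path_list; infer_instance

-- ===== CLAIM (what is proved, stated in full; the proofs are below) =====
def Claim_equal_gen_flip_path_list : Prop := ∀ (path_list : List String) (flip_size : Int), Dom_gen_flip_path_list path_list flip_size → Pre_gen_flip_path_list path_list flip_size → Spec_gen_flip_path_list path_list flip_size (gen_flip_path_list path_list flip_size)

-- ===== LEMMAS AND PROOFS =====

-- one append-per-element step of A's inner loop, and the row-wise step both folds reduce to
def zipApp (cols : List (List String)) (row : List String) : List (List String) :=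
  List.zipWith (fun c x => c ++ [x]) cols row

-- a guarded fold is the fold over the filtered-and-mapped list
theorem foldl_guard_filter_map {α β γ : Type} (xs : List α) (p : α → Prop) [DecidablePred p]
    (f : α → β) (g : γ → β → γ) (init : γ) :
    xs.foldl (fun st l => if p l then g st (f l) else st) init
      = ((xs.filter (fun l => p l)).map f).foldl g init := by
  induction xs generalizing init with
  | nil => rfl
  | cons x xs ih => by_cases h : p x <;> simp [h, ih]

-- A's indexed scatter of one row into the columns, as take/zipWith/drop
theorem scatter_eq (row : List String) : ∀ (cols : List (List String)) (i : Nat),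
    i + row.length ≤ cols.length →
    (row.foldl (fun (st : List (List String) × Nat) x =>
        (st.1.modify st.2 (fun c => c ++ [x]), st.2 + 1)) (cols, i)).1
      = cols.take i ++ List.zipWith (fun c x => c ++ [x]) (cols.drop i) row
          ++ cols.drop (i + row.length) := by
  induction row with
  | nil => intro cols i h; simp
  | cons x xs ih =>
    intro cols i h
    have h' : i + (xs.length + 1) ≤ cols.length := by simpa using h
    have hi : i < cols.length := by omega
    have hmod : cols.modify i (fun c => c ++ [x])
        = (cols.take i ++ [cols[i] ++ [x]]) ++ cols.drop (i + 1) := by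
      rw [List.modify_eq_take_cons_drop hi]; simp
    have hTl : (cols.take i ++ [cols[i] ++ [x]]).length = i + 1 := by
      simp [List.length_take]; omega
    have hlen : i + 1 + xs.length ≤ (cols.modify i (fun c => c ++ [x])).length := by
      simp [List.length_modify]; omega
    have hih := ih (cols.modify i (fun c => c ++ [x])) (i + 1) hlen
    simp only [List.foldl_cons]
    rw [hih, hmod, List.take_left' hTl, List.drop_left' hTl]
    have e3 : ((cols.take i ++ [cols[i] ++ [x]]) ++ cols.drop (i + 1)).drop (i + 1 + xs.length)
        = (cols.drop (i + 1)).drop xs.length := by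
      rw [List.drop_append, List.drop_of_length_le (by omega), hTl]
      simp
    rw [e3, List.drop_drop]
    have hdrop : cols.drop i = cols[i] :: cols.drop (i + 1) := List.drop_eq_getElem_cons hi
    rw [hdrop]
    have : i + 1 + xs.length = i + (xs.length + 1) := by omega
    simp [List.zipWith, this]

-- the length of one row under Pre_'s label bounds
theorem rowOf_length (fs : Int) (p : String)
    (h1 : 1 ≤ fs → 0 ≤ labelOf p ∧ labelOf p ≤ fs)
    (h0 : fs = 0 → labelOf p = 0) :
    (rowOf fs p).length = fs.toNat := by
  unfold rowOf
  rcases lt_trichotomy fs 0 with hneg | hz | hpos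
  · rw [PySem.List.pyRange_one_eq_nil (by omega)]
    simp; omega
  · subst hz
    rw [PySem.List.pyRange_one_cons (by omega), PySem.List.pyRange_one_eq_nil (by omega)]
    simp [h0 rfl]
  · obtain ⟨hl0, hlf⟩ := h1 (by omega)
    rw [PySem.List.pyRange_one_append 0 (labelOf p) (fs + 1) hl0 (by omega),
        PySem.List.pyRange_one_cons (show labelOf p < fs + 1 by omega)]
    rw [List.filter_append, List.filter_cons]
    simp only [decide_not, ne_eq, not_true_eq_false, decide_false,
      Bool.false_eq_true, if_false]
    rw [List.filter_eq_self.mpr (by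
      intro a ha
      have := (PySem.List.mem_pyRange_one).mp ha
      simp; omega)]
    rw [List.filter_eq_self.mpr (by
      intro a ha
      have := (PySem.List.mem_pyRange_one).mp ha
      simp; omega)]
    simp [PySem.List.length_pyRange_one]
    omega

-- A's per-path loop body equals zipApp with that path's row (when the row fits the columns)
theorem inner_eq (fs : Int) (p : String) (cols : List (List String))
    (hlen : (rowOf fs p).length = cols.length) :
    ((PySem.List.pyRange 0 (fs + 1) 1).foldl
      (fun (st : List (List String) × Nat) flip_label =>
        if flip_label ≠ labelOf p then
          (st.1.modify st.2 (fun c => c ++ [mkPath (headOf p) flip_label (tailOf p)]), st.2 + 1)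
        else st)
      (cols, 0)).1 = zipApp cols (rowOf fs p) := by
  rw [foldl_guard_filter_map (PySem.List.pyRange 0 (fs + 1) 1) (fun l => l ≠ labelOf p)
        (fun l => mkPath (headOf p) l (tailOf p))
        (fun (st : List (List String) × Nat) x =>
          (st.1.modify st.2 (fun c => c ++ [x]), st.2 + 1)) (cols, 0)]
  have := scatter_eq (rowOf fs p) cols 0 (by omega)
  unfold rowOf at *
  rw [this, hlen]
  simp [zipApp]

theorem zipApp_length (cols : List (List String)) (row : List String)
    (h : row.length = cols.length) : (zipApp cols row).length = cols.length := by
  simp [zipApp, h]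

-- A's whole path loop is the fold of zipApp over the rows
theorem A_fold_eq (fs : Int) (paths : List String) : ∀ (cols : List (List String)),
    (∀ p ∈ paths, (rowOf fs p).length = cols.length) →
    paths.foldl (fun flip_path_list path =>
      ((PySem.List.pyRange 0 (fs + 1) 1).foldl
        (fun (st : List (List String) × Nat) flip_label =>
          if flip_label ≠ labelOf path then
            (st.1.modify st.2 (fun c => c ++ [mkPath (headOf path) flip_label (tailOf path)]), st.2 + 1)
          else st)
        (flip_path_list, 0)).1) cols
    = paths.foldl (fun cs p => zipApp cs (rowOf fs p)) cols := by
  induction paths with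
  | nil => intro cols _; rfl
  | cons p rest ih =>
    intro cols h
    have hp := h p (by simp)
    simp only [List.foldl_cons]
    rw [inner_eq fs p cols hp]
    exact ih (zipApp cols (rowOf fs p)) (fun q hq => by
      rw [zipApp_length cols _ hp]; exact h q (by simp [hq]))

-- the zipApp fold, elementwise
theorem foldl_zipApp (rows : List (List String)) : ∀ (cols : List (List String)),
    (∀ r ∈ rows, r.length = cols.length) →
    (rows.foldl zipApp cols).length = cols.length ∧
    ∀ j, j < cols.length →
      (rows.foldl zipApp cols).getD j [] = cols.getD j [] ++ rows.map (fun r => r.getD j "") := by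
  induction rows with
  | nil => intro cols _; exact ⟨rfl, by simp⟩
  | cons r rest ih =>
    intro cols h
    have hr := h r (by simp)
    have hz := zipApp_length cols r hr
    obtain ⟨ihl, ihe⟩ := ih (zipApp cols r) (fun q hq => by rw [hz]; exact h q (by simp [hq]))
    refine ⟨by simp [List.foldl_cons, ihl, hz], ?_⟩
    intro j hj
    simp only [List.foldl_cons]
    rw [ihe j (by omega)]
    have hj' : j < (zipApp cols r).length := by omega
    have hjr : j < r.length := by omega
    rw [List.getD_eq_getElem _ _ hj', List.getD_eq_getElem _ _ hj]
    simp only [zipApp, List.getElem_zipWith, List.map_cons]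
    rw [List.getD_eq_getElem _ _ hjr]
    simp

-- ===== VERDICT (by name: the statement is the Claim_ definition above) =====
theorem gen_flip_path_list_spec : Claim_equal_gen_flip_path_list := by
  intro path_list flip_size _hDom hPre
  obtain ⟨_hdig, h1, h0⟩ := hPre
  unfold Spec_gen_flip_path_list gen_flip_path_list gen_flip_path_list_alt
  simp only []
  have hrowlen : ∀ p ∈ path_list, (rowOf flip_size p).length = flip_size.toNat := by
    intro p hp
    exact rowOf_length flip_size p
      (fun hfs => ⟨(h1 hfs p hp).1, (h1 hfs p hp).2.1⟩) (fun hz => h0 hz p hp)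
  have hinitlen : ((PySem.List.pyRange 0 flip_size 1).map
      (fun _ => ([] : List String))).length = flip_size.toNat := by
    simp [PySem.List.length_pyRange_one]
  rw [A_fold_eq flip_size path_list _ (fun p hp => by rw [hinitlen]; exact hrowlen p hp)]
  rw [← List.foldl_map (f := rowOf flip_size) (g := zipApp)]
  cases hpl : path_list.map (rowOf flip_size) with
  | nil => simp
  | cons r rest =>
    have hne : ((r :: rest) : List (List String)).isEmpty = false := by simp
    rw [hne]
    simp only [Bool.false_eq_true, if_false]
    have hrows : ∀ q ∈ r :: rest, q.length
        = ((PySem.List.pyRange 0 flip_size 1).map (fun _ => ([] : List String))).length := by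
      rw [hinitlen, ← hpl]
      intro q hq
      obtain ⟨p, hp, rfl⟩ := List.mem_map.mp hq
      exact hrowlen p hp
    obtain ⟨hlenA, helemA⟩ := foldl_zipApp (r :: rest) _ hrows
    apply List.ext_getElem
    · rw [hlenA, hinitlen]; simp [PySem.List.length_pyRange_one]
    · intro j hjA hjB
      have hj : j < flip_size.toNat := by rw [hlenA, hinitlen] at hjA; exact hjA
      have hA := helemA j (by rw [hinitlen]; exact hj)
      rw [List.getD_eq_getElem _ _ hjA] at hA
      rw [hA]
      have hfs0 : (0 : Int) ≤ flip_size := by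
        by_contra hc
        omega
      have hrng : (PySem.List.pyRange 0 flip_size 1)[j]'(by
          simp [PySem.List.length_pyRange_one]; omega) = (j : Int) := by
        rw [PySem.List.getElem_pyRange_one]; omega
      simp only [List.getElem_map, hrng]
      rw [List.getD_eq_getElem _ _ (by simp [PySem.List.length_pyRange_one]; omega)]
      simp only [List.getElem_map, List.nil_append]
      apply List.map_congr_left
      intro q hq
      rw [PySem.List.pyGetD_natCast]
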